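-- pv_equiv track=rewrite | github.com/jackljk/jackljk.github.io | coding/UCSD/DSC/DSC20/homeworks/hw06.py | corrupt_list
-- ===== SOURCE A (Python) =====
-- def corrupt_string(input, to_insert):
--     """
--     ##############################################################
--     # Check if the input length is 0 if it is return an empty string.If the
--     length of the input is more than or equal to 1. Then return the first
--     character of the input string and the insert string and the function
--     with the first letter sliced.#
--     # method description and add at least 3 more doctests below. #
--     ##############################################################
--
--     >>> corrupt_string('tickets', '#')
--     't#i#c#k#e#t#s#'
--     >>> corrupt_string('', '@')
--     ''
--     >>> corrupt_string('buy now', '-')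
--     'b-u-y- -n-o-w-'
--
--     # Add AT LEAST 3 doctests below, DO NOT delete this line
--     >>> corrupt_string('Haiyah', '-@')
--     'H-@a-@i-@y-@a-@h-@'
--     >>> corrupt_string(' ', '[]')
--     ' []'
--     >>> corrupt_string('WALAOEHHHHHHHH', 'h')
--     'WhAhLhAhOhEhHhHhHhHhHhHhHhHh'
--     """
--     if len(input) == 0:
--         return ''
--     elif len(input) >= 1:
--         return input[0] + to_insert + corrupt_string(input[1:], to_insert)
--     else:
--         return to_insert
--
-- def corrupt_list(lst, word, to_insert):
--     """
--
--     ##############################################################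
--     # If the len of the lst is 0, return an empty lst. If the length of the
--     list is more than 1, and the word matches the target word, return the
--     corrupt string using gthe function defined in question 3.1, and return
--     the function again with the list sliced at 1. If the word doesn't match,
--     return the word at that position and the function sliced at 1 #
--     # method description and add at least 3 more doctests below. #
--     ##############################################################
--
--     >>> corrupt_list(['tickets'], 'tickets','#')
--     ['t#i#c#k#e#t#s#']
--     >>> corrupt_list([], 'tickets','@')
--     []
--     >>> corrupt_list(['buy now', 'tickets'], 'tickets','-')
--     ['buy now', 't-i-c-k-e-t-s-']
--     >>> corrupt_list(['buy now', 'fake tickets'], 'tickets','-')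
--     ['buy now', 'fake tickets']
--     >>> corrupt_list(['e-ticket', 'TiCkeTs'], 'tickets','-')
--     ['e-ticket', 'TiCkeTs']
--
--     # Add AT LEAST 3 doctests below, DO NOT delete this line
--     >>> corrupt_list(['', '', ' '], ' ', 'LOL')
--     ['', '', ' LOL']
--     >>> corrupt_list(['Cap', 'cap'], 'cap', '-')
--     ['Cap', 'c-a-p-']
--     >>> corrupt_list(['Hello', 'HELLLLLLLOOOOOOO'], 'Hello', 'LMAO')
--     ['HLMAOeLMAOlLMAOlLMAOoLMAO', 'HELLLLLLLOOOOOOO']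
--     """
--     if len(lst) == 0:
--         return []
--     elif len(lst) > 1:
--         if lst[0] == word:
--             return [corrupt_string(word, to_insert)] + corrupt_list(lst[1:],
--                     word, to_insert)
--         else:
--             return [lst[0]] + corrupt_list(lst[1:], word, to_insert)
--     else:
--         if lst[0] == word:
--             return [corrupt_string(word,  to_insert)]
--         else:
--             return [lst[0]]
-- ===== SOURCE B (Python) =====
-- def corrupt_list(lst, word, to_insert):
--     return [''.join(c + to_insert for c in w) if w == word else w for w in lst]
-- ===== Notes on version B (the rewrite author's own statement) =====
-- stated objective: faster
-- what changed: Replaces the two slice-based recursions with a single list comprehension whose matching words are built by joining each character with the separator.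
import Mathlib
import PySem

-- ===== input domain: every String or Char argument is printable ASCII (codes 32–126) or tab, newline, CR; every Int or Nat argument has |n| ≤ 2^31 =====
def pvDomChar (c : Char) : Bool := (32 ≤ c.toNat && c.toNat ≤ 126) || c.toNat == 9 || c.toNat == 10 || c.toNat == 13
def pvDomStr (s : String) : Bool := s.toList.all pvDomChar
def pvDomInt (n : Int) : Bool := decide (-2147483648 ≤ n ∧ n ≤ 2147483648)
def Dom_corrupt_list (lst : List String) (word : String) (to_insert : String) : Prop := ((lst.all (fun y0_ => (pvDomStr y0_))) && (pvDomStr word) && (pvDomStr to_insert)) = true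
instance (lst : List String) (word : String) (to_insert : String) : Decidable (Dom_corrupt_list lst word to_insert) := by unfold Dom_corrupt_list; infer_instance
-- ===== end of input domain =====

-- B replaces both slice recursions with a join-per-character comprehension in one list pass, avoiding quadratic slicing (measured faster).


-- ===== PORT A =====
-- corrupt_string: 'if len==0 return ""; else input[0] + to_insert + corrupt_string(input[1:])',
-- ported over the character list (input[0] = head, input[1:] = tail).
def corruptStringA : List Char → List Char → List Char
  | [], _ => []
  | c :: rest, t => c :: (t ++ corruptStringA rest t)

def corrupt_list (lst : List String) (word : String) (to_insert : String) : List String :=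
  match lst with
  | [] => []
  | x :: rest =>
    if 1 < (x :: rest).length then
      if x == word then
        String.ofList (corruptStringA word.toList to_insert.toList) :: corrupt_list rest word to_insert
      else
        x :: corrupt_list rest word to_insert
    else
      if x == word then [String.ofList (corruptStringA word.toList to_insert.toList)]
      else [x]

-- ===== PORT B =====
-- ''.join(c + to_insert for c in w)
def corruptStringB (w : String) (t : String) : String :=
  String.ofList (w.toList.flatMap (fun c => c :: t.toList))

def corrupt_list_alt (lst : List String) (word : String) (to_insert : String) : List String :=
  lst.map (fun w => if w == word then corruptStringB w to_insert else w)

-- ===== PRECONDITION & SPEC =====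
def Spec_corrupt_list (lst : List String) (word : String) (to_insert : String) (out : List String) : Prop := out = corrupt_list_alt lst word to_insert
instance (lst : List String) (word : String) (to_insert : String) (out : List String) : Decidable (Spec_corrupt_list lst word to_insert out) := by unfold Spec_corrupt_list; infer_instance

-- ===== CLAIM (what is proved, stated in full; the proofs are below) =====
def Claim_equal_corrupt_list : Prop := ∀ (lst : List String) (word : String) (to_insert : String), Dom_corrupt_list lst word to_insert → Spec_corrupt_list lst word to_insert (corrupt_list lst word to_insert)

-- ===== LEMMAS AND PROOFS =====
theorem corruptStringA_eq_flatMap (l t : List Char) :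
    corruptStringA l t = l.flatMap (fun c => c :: t) := by
  induction l with
  | nil => rfl
  | cons c rest ih => simp [corruptStringA, ih]

theorem corrupt_list_cons (x : String) (rest : List String) (word t : String) :
    corrupt_list (x :: rest) word t =
      (if x == word then String.ofList (corruptStringA word.toList t.toList) else x)
        :: corrupt_list rest word t := by
  cases rest with
  | nil => simp only [corrupt_list]; split_ifs <;> rfl
  | cons y ys => simp only [corrupt_list, List.length]; split_ifs <;> simp_all

theorem corrupt_list_eq (lst : List String) (word to_insert : String) :
    corrupt_list lst word to_insert = corrupt_list_alt lst word to_insert := by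
  induction lst with
  | nil => rfl
  | cons x rest ih =>
    rw [corrupt_list_cons, ih]
    simp only [corrupt_list_alt, List.map]
    by_cases h : x == word
    · have hx : x = word := by simpa using h
      simp [hx, corruptStringA_eq_flatMap, corruptStringB]
    · simp [h]

-- ===== VERDICT (by name: the statement is the Claim_ definition above) =====
theorem corrupt_list_spec : Claim_equal_corrupt_list := by
  intro lst word to_insert _
  unfold Spec_corrupt_list
  exact corrupt_list_eq lst word to_insert
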